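-- pv_equiv track=rewrite | github.com/greekisme/haloGEN | memory.py | _are_related_words
-- ===== SOURCE A (Python) =====
-- def _are_related_words(word1: str, word2: str) -> bool:
--     """Check if two words are semantically related (basic synonyms and related concepts)."""
--     # Basic synonym and related concept mappings
--     related_groups = [
--         {'eat', 'food', 'pizza', 'meal', 'dinner', 'lunch', 'breakfast', 'snack'},
--         {'color', 'colour', 'blue', 'red', 'green', 'yellow', 'purple', 'orange'},
--         {'dog', 'pet', 'animal', 'puppy', 'canine'},
--         {'sun', 'star', 'solar', 'sunlight', 'bright'},
--         {'like', 'love', 'enjoy', 'prefer', 'favorite', 'favourite'},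
--         {'name', 'named', 'called', 'nickname'},
--         {'short', 'brief', 'quick', 'fast', 'concise'},
--         {'answer', 'response', 'reply', 'solution'}
--     ]
--
--     word1_lower = word1.lower()
--     word2_lower = word2.lower()
--
--     # Check if both words are in the same related group
--     for group in related_groups:
--         if word1_lower in group and word2_lower in group:
--             return True
--
--     return False
-- ===== SOURCE B (Python) =====
-- # Flat word -> group-id table written out once; a call is two lookups and a compare.
-- _WORD_GROUP = {
--     'eat': 0, 'food': 0, 'pizza': 0, 'meal': 0, 'dinner': 0, 'lunch': 0, 'breakfast': 0, 'snack': 0,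
--     'color': 1, 'colour': 1, 'blue': 1, 'red': 1, 'green': 1, 'yellow': 1, 'purple': 1, 'orange': 1,
--     'dog': 2, 'pet': 2, 'animal': 2, 'puppy': 2, 'canine': 2,
--     'sun': 3, 'star': 3, 'solar': 3, 'sunlight': 3, 'bright': 3,
--     'like': 4, 'love': 4, 'enjoy': 4, 'prefer': 4, 'favorite': 4, 'favourite': 4,
--     'name': 5, 'named': 5, 'called': 5, 'nickname': 5,
--     'short': 6, 'brief': 6, 'quick': 6, 'fast': 6, 'concise': 6,
--     'answer': 7, 'response': 7, 'reply': 7, 'solution': 7,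
-- }
--
--
-- def _are_related_words(word1: str, word2: str) -> bool:
--     """Check if two words are semantically related (basic synonyms and related concepts)."""
--     g1 = _WORD_GROUP.get(word1.lower())
--     return g1 is not None and g1 == _WORD_GROUP.get(word2.lower())
-- ===== Notes on version B (the rewrite author's own statement) =====
-- stated objective: faster
-- what changed: Replaces the per-call scan over the list of word groups by a flat word-to-group-id dict literal; a call is two dict lookups and an equality compare (correct because no word occurs in two groups).
import Mathlib
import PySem

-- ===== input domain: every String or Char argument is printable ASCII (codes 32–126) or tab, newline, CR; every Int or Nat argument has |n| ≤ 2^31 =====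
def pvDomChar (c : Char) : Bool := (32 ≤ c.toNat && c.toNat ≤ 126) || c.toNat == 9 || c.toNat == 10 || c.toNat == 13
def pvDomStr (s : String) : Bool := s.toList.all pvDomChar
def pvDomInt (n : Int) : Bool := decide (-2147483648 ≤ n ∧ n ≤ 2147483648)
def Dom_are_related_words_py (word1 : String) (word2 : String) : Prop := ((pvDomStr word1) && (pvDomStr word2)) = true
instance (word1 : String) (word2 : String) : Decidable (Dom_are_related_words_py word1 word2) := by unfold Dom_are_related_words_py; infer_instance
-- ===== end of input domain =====

-- B replaces A's per-call scan over the list of word groups by a flat literal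
-- word→group-id dict, so a call is two lookups and a compare (objective: faster per call;
-- correct because no word occurs in two groups).

-- ===== PORT A =====
-- A's literal list of related-word sets (Python set literals → PySem.Set.ofList).
def relatedGroupsA : List (PySem.Set String) :=
  [PySem.Set.ofList ["eat", "food", "pizza", "meal", "dinner", "lunch", "breakfast", "snack"],
   PySem.Set.ofList ["color", "colour", "blue", "red", "green", "yellow", "purple", "orange"],
   PySem.Set.ofList ["dog", "pet", "animal", "puppy", "canine"],
   PySem.Set.ofList ["sun", "star", "solar", "sunlight", "bright"],
   PySem.Set.ofList ["like", "love", "enjoy", "prefer", "favorite", "favourite"],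
   PySem.Set.ofList ["name", "named", "called", "nickname"],
   PySem.Set.ofList ["short", "brief", "quick", "fast", "concise"],
   PySem.Set.ofList ["answer", "response", "reply", "solution"]]

-- A's for-loop with early return over the groups.
def loopA (l1 l2 : String) : List (PySem.Set String) → Bool
  | [] => false
  | g :: rest =>
    if PySem.Set.contains g l1 && PySem.Set.contains g l2 then true
    else loopA l1 l2 rest

def are_related_words_py (word1 : String) (word2 : String) : Bool :=
  loopA (PySem.Str.lower word1) (PySem.Str.lower word2) relatedGroupsA

-- ===== PORT B =====
-- Source B's _WORD_GROUP dict literal: word -> group id.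
def wordGroup : PySem.Dict String Int := PySem.Dict.ofList
  [("eat", 0), ("food", 0), ("pizza", 0), ("meal", 0), ("dinner", 0), ("lunch", 0), ("breakfast", 0), ("snack", 0),
   ("color", 1), ("colour", 1), ("blue", 1), ("red", 1), ("green", 1), ("yellow", 1), ("purple", 1), ("orange", 1),
   ("dog", 2), ("pet", 2), ("animal", 2), ("puppy", 2), ("canine", 2),
   ("sun", 3), ("star", 3), ("solar", 3), ("sunlight", 3), ("bright", 3),
   ("like", 4), ("love", 4), ("enjoy", 4), ("prefer", 4), ("favorite", 4), ("favourite", 4),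
   ("name", 5), ("named", 5), ("called", 5), ("nickname", 5),
   ("short", 6), ("brief", 6), ("quick", 6), ("fast", 6), ("concise", 6),
   ("answer", 7), ("response", 7), ("reply", 7), ("solution", 7)]

-- g1 = _WORD_GROUP.get(word1.lower()); return g1 is not None and g1 == _WORD_GROUP.get(word2.lower())
def are_related_words_py_alt (word1 : String) (word2 : String) : Bool :=
  match wordGroup.get? (PySem.Str.lower word1) with
  | none => false
  | some g1 => wordGroup.get? (PySem.Str.lower word2) == some g1

-- ===== PRECONDITION & SPEC =====
def Spec_are_related_words_py (word1 : String) (word2 : String) (out : Bool) : Prop := out = are_related_words_py_alt word1 word2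
instance (word1 : String) (word2 : String) (out : Bool) : Decidable (Spec_are_related_words_py word1 word2 out) := by unfold Spec_are_related_words_py; infer_instance

-- ===== CLAIM =====
def Claim_equal_are_related_words_py : Prop := ∀ (word1 : String) (word2 : String), Dom_are_related_words_py word1 word2 → Spec_are_related_words_py word1 word2 (are_related_words_py word1 word2)

-- ===== LEMMAS AND PROOFS =====

-- proof-side view of A's groups as plain lists, and the flat word list
def groupsListA : List (List String) :=
  [["eat", "food", "pizza", "meal", "dinner", "lunch", "breakfast", "snack"],
   ["color", "colour", "blue", "red", "green", "yellow", "purple", "orange"],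
   ["dog", "pet", "animal", "puppy", "canine"],
   ["sun", "star", "solar", "sunlight", "bright"],
   ["like", "love", "enjoy", "prefer", "favorite", "favourite"],
   ["name", "named", "called", "nickname"],
   ["short", "brief", "quick", "fast", "concise"],
   ["answer", "response", "reply", "solution"]]

def allWords : List String := groupsListA.flatten

theorem groupsA_eq : relatedGroupsA = groupsListA.map PySem.Set.ofList := by decide

set_option maxRecDepth 8192 in
theorem keys_wordGroup : wordGroup.keys = allWords := by decide

theorem loopA_false_left (l1 l2 : String)
    (h : ∀ g ∈ relatedGroupsA, PySem.Set.contains g l1 = false) :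
    loopA l1 l2 relatedGroupsA = false := by
  have aux : ∀ gs : List (PySem.Set String),
      (∀ g ∈ gs, PySem.Set.contains g l1 = false) → loopA l1 l2 gs = false := by
    intro gs
    induction gs with
    | nil => intro _; rfl
    | cons g rest ih =>
      intro h'
      rw [loopA, h' g (by simp), Bool.false_and]
      simpa using ih (fun g' hg' => h' g' (by simp [hg']))
  exact aux _ h

theorem loopA_false_right (l1 l2 : String)
    (h : ∀ g ∈ relatedGroupsA, PySem.Set.contains g l2 = false) :
    loopA l1 l2 relatedGroupsA = false := by
  have aux : ∀ gs : List (PySem.Set String),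
      (∀ g ∈ gs, PySem.Set.contains g l2 = false) → loopA l1 l2 gs = false := by
    intro gs
    induction gs with
    | nil => intro _; rfl
    | cons g rest ih =>
      intro h'
      rw [loopA, h' g (by simp), Bool.and_false]
      simpa using ih (fun g' hg' => h' g' (by simp [hg']))
  exact aux _ h

-- membership in a group implies membership in the flat word list
theorem contains_sub (s : String) (g : PySem.Set String) (hg : g ∈ relatedGroupsA)
    (hc : PySem.Set.contains g s = true) : s ∈ allWords := by
  rw [groupsA_eq] at hg
  obtain ⟨l, hl, rfl⟩ := List.mem_map.mp hg
  have hs : s ∈ l := by simpa [PySem.Set.contains_iff, PySem.Set.mem_ofList] using hc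
  exact List.mem_flatten.mpr ⟨l, hl, hs⟩

theorem get?_none_of_not_mem (s : String) (h : s ∉ allWords) :
    wordGroup.get? s = none := by
  rw [PySem.Dict.get?_eq_none_iff_not_mem_keys, keys_wordGroup]
  exact h

-- the two call bodies agree whenever both lowered words are among the 45 known words
set_option maxRecDepth 100000 in
theorem both_mem_case :
    ∀ l1 ∈ allWords, ∀ l2 ∈ allWords,
      loopA l1 l2 relatedGroupsA =
        (match wordGroup.get? l1 with
         | none => false
         | some g1 => wordGroup.get? l2 == some g1) := by
  decide

theorem core (l1 l2 : String) :
    loopA l1 l2 relatedGroupsA =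
      (match wordGroup.get? l1 with
       | none => false
       | some g1 => wordGroup.get? l2 == some g1) := by
  by_cases h1 : l1 ∈ allWords
  · by_cases h2 : l2 ∈ allWords
    · exact both_mem_case l1 h1 l2 h2
    · rw [loopA_false_right l1 l2 (fun g hg => by
        by_contra hc
        exact h2 (contains_sub l2 g hg (by simpa using hc)))]
      rw [get?_none_of_not_mem l2 h2]
      cases wordGroup.get? l1 <;> rfl
  · rw [loopA_false_left l1 l2 (fun g hg => by
      by_contra hc
      exact h1 (contains_sub l1 g hg (by simpa using hc)))]
    rw [get?_none_of_not_mem l1 h1]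

-- ===== VERDICT =====
theorem are_related_words_py_spec : Claim_equal_are_related_words_py := by
  intro word1 word2 _
  unfold Spec_are_related_words_py are_related_words_py are_related_words_py_alt
  exact core (PySem.Str.lower word1) (PySem.Str.lower word2)
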